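-- pv_equiv track=rewrite | github.com/Misganaw-Berihun/CONTESTS | Contest_5/poisoned_dagger.py | findMinAttack
-- ===== SOURCE A (Python) =====
-- def findMinAttack(attacks,h):
--     n = len(attacks)
--     dif = [0 for i in range(n)]
--     for i in range(1,n):
--         dif[i - 1] = attacks[i] - attacks[i-1]
--
--     l ,r = 1,h - n + 1
--
--     while l <= r:
--         m = l + (r-l)//2
--         dif[n-1] = m
--         temp = 0
--
--         for i in range(n):
--             if dif[i] <= m:
--                 temp += dif[i]
--             else:
--                 temp += m
--
--         if temp >= h:
--             r = m - 1
--         else: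
--             l = m + 1
--
--     return int(l)
-- ===== SOURCE B (Python) =====
-- def findMinAttack(attacks, h):
--     # Sort the consecutive gaps once and take prefix sums; each binary-search
--     # probe then computes the total damage by bisection on the sorted gaps
--     # and a closed formula, rather than by rescanning all gaps.
--     n = len(attacks)
--     d = sorted(b - a for a, b in zip(attacks, attacks[1:]))
--     k = len(d)
--     pre = [0]
--     s = 0
--     for x in d:
--         s += x
--         pre.append(s)
--
--     def damage(m):
--         # c = how many gaps are <= m (hand-rolled bisect_right on the sorted gaps)
--         lo, hi = 0, k
--         while lo < hi:
--             mid = (lo + hi) // 2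
--             if d[mid] <= m:
--                 lo = mid + 1
--             else:
--                 hi = mid
--         return pre[lo] + (k - lo) * m + m
--
--     l, r = 1, h - n + 1
--     while l <= r:
--         m = l + (r - l) // 2
--         if damage(m) >= h:
--             r = m - 1
--         else:
--             l = m + 1
--     return l
-- ===== Notes on version B (the rewrite author's own statement) =====
-- stated objective: alternative
-- what changed: B sorts the consecutive gaps once and keeps prefix sums, so each binary-search probe over the duration computes the total damage by a bisection on the sorted gaps and a closed formula rather than by A's rescan of the gap array; it trades a sort and a prefix pass for the per-probe scans.
import Mathlib
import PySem

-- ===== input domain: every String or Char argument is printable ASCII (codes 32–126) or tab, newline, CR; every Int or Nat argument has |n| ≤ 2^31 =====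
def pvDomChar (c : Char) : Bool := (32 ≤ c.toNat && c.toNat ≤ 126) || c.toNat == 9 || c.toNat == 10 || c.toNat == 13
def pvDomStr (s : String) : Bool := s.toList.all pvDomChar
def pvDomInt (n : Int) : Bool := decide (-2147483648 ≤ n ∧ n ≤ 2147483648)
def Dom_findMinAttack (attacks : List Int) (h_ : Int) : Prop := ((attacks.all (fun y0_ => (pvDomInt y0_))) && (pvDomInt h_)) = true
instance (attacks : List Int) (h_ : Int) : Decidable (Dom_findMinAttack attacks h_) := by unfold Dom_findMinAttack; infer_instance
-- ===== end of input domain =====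

-- B evaluates each binary-search probe's damage from sorted gaps + prefix sums via an
-- inner bisection instead of A's rescan of the gap array (objective: alternative).

-- ===== PORT A =====
-- while l <= r: … (binary search on m; dif[n-1] = m mutates the carried list, faithful to A).
-- fuel is only a totality guard: the interval r - l + 1 shrinks every iteration, so the
-- initial fuel (r - l + 1) + 1 is never exhausted and the port follows A's loop exactly.
def findMinAttackLoop (n h_ : Int) : Nat → List Int → Int → Int → Int
  | 0, _, l, _ => l
  | fuel + 1, dif, l, r =>
    if l ≤ r then
      let m := l + PySem.Int.floordiv (r - l) 2
      let dif' := PySem.List.pySetD dif (n - 1) m   -- dif[n-1] = m (index in range whenever n ≥ 1, i.e. inside Pre_)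
      let temp := (PySem.List.pyRange 0 n 1).foldl
        (fun t i => if PySem.List.pyGetD dif' i 0 ≤ m then t + PySem.List.pyGetD dif' i 0 else t + m) 0
      if temp ≥ h_ then findMinAttackLoop n h_ fuel dif' l (m - 1)
      else findMinAttackLoop n h_ fuel dif' (m + 1) r
    else l

def findMinAttack (attacks : List Int) (h_ : Int) : Int :=
  let n : Int := attacks.length
  let dif0 : List Int := (PySem.List.pyRange 0 n 1).map (fun _ => 0)
  -- for i in range(1, n): dif[i-1] = attacks[i] - attacks[i-1]   (all indices in range)
  let dif := (PySem.List.pyRange 1 n 1).foldl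
    (fun d i => PySem.List.pySetD d (i - 1)
      (PySem.List.pyGetD attacks i 0 - PySem.List.pyGetD attacks (i - 1) 0)) dif0
  findMinAttackLoop n h_ ((h_ - n + 1).toNat + 1) dif 1 (h_ - n + 1)

-- ===== PORT B =====
-- hand-written bisect_right over the sorted gap list (lo, hi are nonnegative Python ints).
-- fuel is only a totality guard: hi - lo shrinks every iteration, so hi - lo + 1 suffices.
def altBisect (d : List Int) (m : Int) : Nat → Nat → Nat → Nat
  | 0, lo, _ => lo
  | fuel + 1, lo, hi =>
    if lo < hi then
      let mid := (lo + hi) / 2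
      if d.getD mid 0 ≤ m then altBisect d m fuel (mid + 1) hi
      else altBisect d m fuel lo mid
    else lo

-- damage(m) = pre[c] + (k - c) * m + m
def altDamage (d pre : List Int) (k m : Int) : Int :=
  let c := altBisect d m (d.length + 1) 0 d.length
  pre.getD c 0 + (k - (c : Int)) * m + m

-- while l <= r of B, same fuel guard as A's port
def altLoop (d pre : List Int) (k h_ : Int) : Nat → Int → Int → Int
  | 0, l, _ => l
  | fuel + 1, l, r =>
    if l ≤ r then
      let m := l + PySem.Int.floordiv (r - l) 2
      if altDamage d pre k m ≥ h_ then altLoop d pre k h_ fuel l (m - 1)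
      else altLoop d pre k h_ fuel (m + 1) r
    else l

def findMinAttack_alt (attacks : List Int) (h_ : Int) : Int :=
  let n : Int := attacks.length
  let d := PySem.List.sorted (List.zipWith (fun a b => b - a) attacks (attacks.drop 1)) (fun x => x) false
  let k : Int := d.length
  -- pre = [0]; s = 0; for x in d: s += x; pre.append(s)
  let pre := (d.foldl (fun ps x => (ps.1 ++ [ps.2 + x], ps.2 + x)) (([0] : List Int), (0 : Int))).1
  altLoop d pre k h_ ((h_ - n + 1).toNat + 1) 1 (h_ - n + 1)

-- ===== PRECONDITION & SPEC =====
-- Pre_ excludes exactly the inputs where A raises: with attacks == [] and h >= 0 the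
-- loop body executes dif[-1] = m on the empty dif and raises IndexError.
def Pre_findMinAttack (attacks : List Int) (h_ : Int) : Prop := attacks ≠ [] ∨ h_ < 0
instance (attacks : List Int) (h_ : Int) : Decidable (Pre_findMinAttack attacks h_) := by unfold Pre_findMinAttack; infer_instance

def pvWitness_findMinAttack : List Int × Int := ([2, 5], 7)

def Spec_findMinAttack (attacks : List Int) (h_ : Int) (out : Int) : Prop := out = findMinAttack_alt attacks h_
instance (attacks : List Int) (h_ : Int) (out : Int) : Decidable (Spec_findMinAttack attacks h_ out) := by unfold Spec_findMinAttack; infer_instance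

-- ===== CLAIM (what is proved, stated in full; the proofs are below) =====
def Claim_equal_findMinAttack : Prop := ∀ (attacks : List Int) (h_ : Int), Dom_findMinAttack attacks h_ → Pre_findMinAttack attacks h_ → Spec_findMinAttack attacks h_ (findMinAttack attacks h_)

-- ===== LEMMAS AND PROOFS =====

-- the consecutive-gap list both programs are about
def pvDiffs (attacks : List Int) : List Int :=
  List.zipWith (fun a b => b - a) attacks (attacks.drop 1)

-- running partial sums starting from s
def pvPartial (s : Int) : List Int → List Int
  | [] => []
  | x :: t => (s + x) :: pvPartial (s + x) t

-- the damage accumulation of A's inner loop, as a named function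
def pvTempOf (e : List Int) (n m : Int) : Int :=
  (PySem.List.pyRange 0 n 1).foldl
    (fun t i => if PySem.List.pyGetD e i 0 ≤ m then t + PySem.List.pyGetD e i 0 else t + m) 0

theorem pvDif0 (n : Nat) :
    (PySem.List.pyRange 0 (n : Int) 1).map (fun _ => (0 : Int)) = List.replicate n 0 := by
  rw [List.eq_replicate_iff]
  constructor
  · simp [PySem.List.length_pyRange_one]
  · intro b hb
    simp only [List.mem_map] at hb
    obtain ⟨_, _, hb⟩ := hb
    exact hb.symm

theorem pvDifBuild (attacks : List Int) (hne : attacks ≠ []) :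
    (PySem.List.pyRange 1 (attacks.length : Int) 1).foldl
      (fun d i => PySem.List.pySetD d (i - 1)
        (PySem.List.pyGetD attacks i 0 - PySem.List.pyGetD attacks (i - 1) 0))
      ((PySem.List.pyRange 0 (attacks.length : Int) 1).map (fun _ => (0 : Int)))
    = pvDiffs attacks ++ [0] := by
  have hn1 : 1 ≤ attacks.length := List.length_pos_of_ne_nil hne
  have hDlen : (pvDiffs attacks).length = attacks.length - 1 := by
    simp [pvDiffs, List.length_zipWith]
  have key : ∀ (k : Nat), k ≤ attacks.length - 1 →
      (PySem.List.pyRange 1 (1 + (k : Int)) 1).foldl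
        (fun d i => PySem.List.pySetD d (i - 1)
          (PySem.List.pyGetD attacks i 0 - PySem.List.pyGetD attacks (i - 1) 0))
        ((PySem.List.pyRange 0 (attacks.length : Int) 1).map (fun _ => (0 : Int)))
      = (pvDiffs attacks).take k ++ List.replicate (attacks.length - k) 0 := by
    intro k
    induction k with
    | zero =>
      intro _
      rw [show (1:Int) + ((0:Nat):Int) = 1 by norm_num,
        PySem.List.pyRange_one_eq_nil (le_refl (1:Int))]
      simp only [List.foldl_nil, List.take_zero, List.nil_append, Nat.sub_zero]
      exact pvDif0 attacks.length
    | succ k ih =>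
      intro hk
      have h1k : (1:Int) + ((k+1 : Nat) : Int) = (1 + (k:Int)) + 1 := by push_cast; ring
      rw [h1k, PySem.List.pyRange_one_succ_right (by omega), List.foldl_append]
      rw [ih (by omega)]
      simp only [List.foldl_cons, List.foldl_nil]
      rw [show (1 + (k:Int)) - 1 = (k:Int) by ring]
      rw [PySem.List.pySetD_of_nonneg _ _ (by omega)]
      rw [PySem.List.pyGetD_of_nonneg _ _ (by omega), PySem.List.pyGetD_of_nonneg _ _ (by omega)]
      have htk : ((k:Int)).toNat = k := by omega
      have htk1 : ((1:Int) + (k:Int)).toNat = k + 1 := by omega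
      rw [htk, htk1]
      have hklt : k < (pvDiffs attacks).length := by omega
      have hk1lt : k + 1 < attacks.length := by omega
      have hklen : k < attacks.length := by omega
      rw [List.getD_eq_getElem _ _ hk1lt, List.getD_eq_getElem _ _ hklen]
      rw [List.set_append]
      have hlt : ¬ k < ((pvDiffs attacks).take k).length := by
        simp [List.length_take]
      rw [if_neg hlt]
      have hlen0 : k - ((pvDiffs attacks).take k).length = 0 := by
        simp only [List.length_take]
        omega
      rw [hlen0]
      have hrep : attacks.length - k = (attacks.length - (k+1)) + 1 := by omega
      rw [hrep, List.replicate_succ, List.set_cons_zero]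
      rw [← List.take_concat_get hklt, List.concat_eq_append, List.append_assoc,
        List.singleton_append]
      have hgd : attacks[k+1] - attacks[k] = (pvDiffs attacks)[k] := by
        simp [pvDiffs, List.getElem_zipWith]
      rw [hgd]
  have hthis := key (attacks.length - 1) (le_refl _)
  have hfin : (1:Int) + ((attacks.length - 1 : Nat) : Int) = (attacks.length : Int) := by omega
  rw [hfin] at hthis
  rw [hthis, List.take_of_length_le (by omega),
    show attacks.length - (attacks.length - 1) = 1 by omega]
  rfl

theorem pvFoldMin (m : Int) : ∀ (e : List Int) (s : Int),
    e.foldl (fun t x => if x ≤ m then t + x else t + m) s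
      = s + (e.map (fun x => min x m)).sum := by
  intro e
  induction e with
  | nil => intro s; simp
  | cons x t ih =>
    intro s
    simp only [List.foldl_cons, List.map_cons, List.sum_cons, ih, min_def]
    split_ifs <;> ring

theorem pvTempOf_eq_sum (e : List Int) (m : Int) :
    pvTempOf e (e.length : Int) m = (e.map (fun x => min x m)).sum := by
  unfold pvTempOf
  rw [PySem.List.foldl_pyRange_zero_pyGetD' e 0 (fun t x => if x ≤ m then t + x else t + m) 0]
  rw [pvFoldMin]
  ring

theorem pvAllGt (m : Int) : ∀ (e : List Int), (∀ x ∈ e, m < x) →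
    (e.map (fun x => min x m)).sum = (e.length : Int) * m := by
  intro e
  induction e with
  | nil => intro _; simp
  | cons x t ih =>
    intro hgt
    simp only [List.map_cons, List.sum_cons, List.length_cons]
    rw [ih (fun y hy => hgt y (List.mem_cons_of_mem _ hy)),
        min_eq_right (le_of_lt (hgt x List.mem_cons_self))]
    push_cast
    ring

theorem pvSplitSum (m : Int) : ∀ (e : List Int) (c : Nat), c ≤ e.length →
    (∀ (j : Nat) (hj : j < e.length), j < c → e[j] ≤ m) →
    (∀ (j : Nat) (hj : j < e.length), c ≤ j → m < e[j]) →
    (e.map (fun x => min x m)).sum = (e.take c).sum + ((e.length : Int) - (c : Int)) * m := by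
  intro e
  induction e with
  | nil => intro c hc _ _; simp_all
  | cons x t ih =>
    intro c hc h1 h2
    cases c with
    | zero =>
      rw [pvAllGt m (x :: t) ?_]
      · simp
      · intro y hy
        obtain ⟨j, hj, rfl⟩ := List.mem_iff_getElem.mp hy
        exact h2 j hj (Nat.zero_le j)
    | succ c' =>
      have hx : x ≤ m := h1 0 (by simp) (Nat.succ_pos c')
      simp only [List.map_cons, List.sum_cons, List.take_succ_cons, List.length_cons]
      rw [min_eq_left hx]
      rw [ih c' (by simpa using hc)
        (fun j hj hjc => by
          have := h1 (j + 1) (by simpa using Nat.succ_lt_succ hj) (Nat.succ_lt_succ hjc)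
          simpa using this)
        (fun j hj hjc => by
          have := h2 (j + 1) (by simpa using Nat.succ_lt_succ hj) (Nat.succ_le_succ hjc)
          simpa using this)]
      push_cast
      ring

theorem pvBisect (d : List Int) (m : Int) (hs : d.Pairwise (· ≤ ·)) :
    ∀ (fuel lo hi : Nat), hi - lo < fuel → lo ≤ hi → hi ≤ d.length →
    (∀ (j : Nat) (hj : j < d.length), j < lo → d[j] ≤ m) →
    (∀ (j : Nat) (hj : j < d.length), hi ≤ j → m < d[j]) →
    altBisect d m fuel lo hi ≤ d.length ∧
    (∀ (j : Nat) (hj : j < d.length), j < altBisect d m fuel lo hi → d[j] ≤ m) ∧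
    (∀ (j : Nat) (hj : j < d.length), altBisect d m fuel lo hi ≤ j → m < d[j]) := by
  intro fuel
  induction fuel with
  | zero => intro lo hi hf; exact absurd hf (Nat.not_lt_zero _)
  | succ fuel ih =>
    intro lo hi hf hlh hhi h1 h2
    simp only [altBisect]
    by_cases hlt : lo < hi
    · rw [if_pos hlt]
      have hmid : (lo + hi) / 2 < hi := by omega
      have hmlo : lo ≤ (lo + hi) / 2 := by omega
      have hmlen : (lo + hi) / 2 < d.length := by omega
      split_ifs with hle
      · refine ih ((lo + hi) / 2 + 1) hi (by omega) (by omega) hhi ?_ h2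
        intro j hj hjlt
        have hdm : d[(lo + hi) / 2] ≤ m := by
          rw [← List.getD_eq_getElem d 0 hmlen]; exact hle
        rcases Nat.lt_or_ge j ((lo + hi) / 2) with hc | hc
        · rcases Nat.lt_or_ge j lo with hc2 | hc2
          · exact h1 j hj hc2
          · exact le_trans (List.pairwise_iff_getElem.mp hs j ((lo + hi) / 2) hj hmlen hc) hdm
        · have : j = (lo + hi) / 2 := by omega
          subst this; exact hdm
      · refine ih lo ((lo + hi) / 2) (by omega) hmlo (by omega) h1 ?_
        intro j hj hjge
        have hdm : m < d[(lo + hi) / 2] := by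
          rw [← List.getD_eq_getElem d 0 hmlen]; omega
        rcases Nat.lt_or_ge ((lo + hi) / 2) j with hc | hc
        · exact lt_of_lt_of_le hdm (List.pairwise_iff_getElem.mp hs ((lo + hi) / 2) j hmlen hj hc)
        · have : j = (lo + hi) / 2 := by omega
          subst this; exact hdm
    · rw [if_neg hlt]
      have heq : lo = hi := by omega
      subst heq
      exact ⟨hhi, h1, h2⟩

theorem pvPre (d : List Int) : ∀ (p : List Int) (s : Int),
    (d.foldl (fun ps x => (ps.1 ++ [ps.2 + x], ps.2 + x)) (p, s)).1 = p ++ pvPartial s d := by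
  induction d with
  | nil => intro p s; simp [pvPartial]
  | cons x t ih =>
    intro p s
    simp only [List.foldl_cons, pvPartial, ih, List.append_assoc, List.singleton_append]

theorem pvPreGetD (d : List Int) : ∀ (c : Nat) (s : Int), c < d.length →
    (pvPartial s d).getD c 0 = s + (d.take (c + 1)).sum := by
  induction d with
  | nil => intro c s h; simp at h
  | cons x t ih =>
    intro c s h
    cases c with
    | zero => simp [pvPartial]
    | succ c' =>
      simp only [pvPartial, List.getD_cons_succ]
      rw [ih c' (s + x) (by simpa using h)]
      have : List.take (c' + 1 + 1) (x :: t) = x :: List.take (c' + 1) t := rfl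
      rw [this]
      simp only [List.sum_cons]
      ring

theorem pvPreGetD0 (d : List Int) (c : Nat) (hc : c ≤ d.length) :
    (0 :: pvPartial 0 d).getD c 0 = (d.take c).sum := by
  cases c with
  | zero => simp
  | succ c' =>
    simp only [List.getD_cons_succ]
    rw [pvPreGetD d c' 0 (by omega)]
    simp

theorem pvDamageEq (attacks : List Int) (hne : attacks ≠ []) (m : Int) :
    pvTempOf (PySem.List.pySetD (pvDiffs attacks ++ [0]) ((attacks.length : Int) - 1) m)
        (attacks.length : Int) m
      = altDamage (PySem.List.sorted (pvDiffs attacks) (fun x => x) false)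
          (0 :: pvPartial 0 (PySem.List.sorted (pvDiffs attacks) (fun x => x) false))
          ((PySem.List.sorted (pvDiffs attacks) (fun x => x) false).length : Int) m := by
  have hn1 : 1 ≤ attacks.length := List.length_pos_of_ne_nil hne
  have hDlen : (pvDiffs attacks).length = attacks.length - 1 := by
    simp [pvDiffs, List.length_zipWith]
  -- the assignment dif[n-1] = m writes the last slot
  have hset : PySem.List.pySetD (pvDiffs attacks ++ [0]) ((attacks.length : Int) - 1) m
      = pvDiffs attacks ++ [m] := by
    rw [PySem.List.pySetD_of_nonneg _ _ (by omega)]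
    have h1 : ((attacks.length : Int) - 1).toNat = (pvDiffs attacks).length := by omega
    rw [h1, List.set_append]
    simp
  rw [hset]
  have hlen : (attacks.length : Int) = ((pvDiffs attacks ++ [m]).length : Int) := by
    simp [hDlen]; omega
  rw [hlen, pvTempOf_eq_sum]
  simp only [List.map_append, List.sum_append, List.map_cons, List.map_nil, List.sum_cons,
    List.sum_nil, min_self, add_zero]
  -- pass to the sorted gap list
  have hperm : (PySem.List.sorted (pvDiffs attacks) (fun x => x) false).Perm (pvDiffs attacks) :=
    PySem.List.sorted_perm _ _ _
  have hsum : ((pvDiffs attacks).map (fun x => min x m)).sum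
      = ((PySem.List.sorted (pvDiffs attacks) (fun x => x) false).map (fun x => min x m)).sum :=
    ((hperm.map _).sum_eq).symm
  have hpair : (PySem.List.sorted (pvDiffs attacks) (fun x => x) false).Pairwise (· ≤ ·) := by
    have := PySem.List.sorted_pairwise (pvDiffs attacks) (fun x => x)
    simpa using this
  obtain ⟨hc1, hc2, hc3⟩ := pvBisect _ m hpair
    ((PySem.List.sorted (pvDiffs attacks) (fun x => x) false).length + 1) 0 _ (by omega) (Nat.zero_le _) (le_refl _)
    (fun j hj h => absurd h (Nat.not_lt_zero j)) (fun j hj h => absurd hj (by omega))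
  rw [hsum, pvSplitSum m _ _ hc1 hc2 hc3]
  simp only [altDamage]
  rw [pvPreGetD0 _ _ hc1]

theorem pvLoopEq (dif d pre : List Int) (n k h_ : Int) (hn : 0 ≤ n - 1)
    (hd : ∀ m, pvTempOf (PySem.List.pySetD dif (n - 1) m) n m = altDamage d pre k m) :
    ∀ (fuel : Nat) (l r : Int) (dif2 : List Int),
    (∀ m, PySem.List.pySetD dif2 (n - 1) m = PySem.List.pySetD dif (n - 1) m) →
    findMinAttackLoop n h_ fuel dif2 l r = altLoop d pre k h_ fuel l r := by
  intro fuel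
  induction fuel with
  | zero => intro l r dif2 _; rfl
  | succ fuel ih =>
    intro l r dif2 hset
    simp only [findMinAttackLoop, altLoop]
    by_cases hlr : l ≤ r
    · rw [if_pos hlr, if_pos hlr]
      have htemp : pvTempOf (PySem.List.pySetD dif2 (n - 1) (l + PySem.Int.floordiv (r - l) 2)) n
            (l + PySem.Int.floordiv (r - l) 2)
          = altDamage d pre k (l + PySem.Int.floordiv (r - l) 2) := by
        rw [hset]; exact hd _
      rw [show (PySem.List.pyRange 0 n 1).foldl
            (fun t i => if PySem.List.pyGetD (PySem.List.pySetD dif2 (n - 1)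
                (l + PySem.Int.floordiv (r - l) 2)) i 0 ≤ l + PySem.Int.floordiv (r - l) 2
              then t + PySem.List.pyGetD (PySem.List.pySetD dif2 (n - 1)
                (l + PySem.Int.floordiv (r - l) 2)) i 0
              else t + (l + PySem.Int.floordiv (r - l) 2)) 0
          = pvTempOf (PySem.List.pySetD dif2 (n - 1) (l + PySem.Int.floordiv (r - l) 2)) n
              (l + PySem.Int.floordiv (r - l) 2) from rfl]
      rw [htemp]
      have hset' : ∀ m', PySem.List.pySetD
          (PySem.List.pySetD dif2 (n - 1) (l + PySem.Int.floordiv (r - l) 2)) (n - 1) m'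
          = PySem.List.pySetD dif (n - 1) m' := by
        intro m'
        rw [PySem.List.pySetD_of_nonneg _ _ (by omega), PySem.List.pySetD_of_nonneg _ _ (by omega),
          List.set_set, ← PySem.List.pySetD_of_nonneg _ _ (by omega : (0:Int) ≤ n - 1), hset]
      split_ifs with hge
      · exact ih l _ _ hset'
      · exact ih _ r _ hset'
    · rw [if_neg hlr, if_neg hlr]
-- ===== VERDICT (by name: the statement is the Claim_ definition above) =====
theorem findMinAttack_spec : Claim_equal_findMinAttack := by
  intro attacks h_ _ hpre
  unfold Spec_findMinAttack
  by_cases hne : attacks = []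
  · subst hne
    have hh : h_ < 0 := by
      rcases hpre with h | h
      · exact absurd rfl h
      · exact h
    have hA : findMinAttack [] h_
        = findMinAttackLoop 0 h_ ((h_ - 0 + 1).toNat + 1) [] 1 (h_ - 0 + 1) := rfl
    have hB : findMinAttack_alt [] h_
        = altLoop [] [0] 0 h_ ((h_ - 0 + 1).toNat + 1) 1 (h_ - 0 + 1) := rfl
    rw [hA, hB]
    simp only [findMinAttackLoop, altLoop]
    have hno : ¬ (1:Int) ≤ h_ - 0 + 1 := by omega
    rw [if_neg hno, if_neg hno]
  · have hn1 : 1 ≤ attacks.length := List.length_pos_of_ne_nil hne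
    simp only [findMinAttack, findMinAttack_alt]
    rw [pvDifBuild attacks hne]
    rw [show List.zipWith (fun a b => b - a) attacks (attacks.drop 1) = pvDiffs attacks from rfl]
    rw [pvPre]
    simp only [List.singleton_append]
    exact pvLoopEq (pvDiffs attacks ++ [0]) _ _ (attacks.length : Int) _ h_ (by omega)
      (fun m => pvDamageEq attacks hne m)
      ((h_ - (attacks.length : Int) + 1).toNat + 1) 1 (h_ - (attacks.length : Int) + 1)
      (pvDiffs attacks ++ [0]) (fun m => rfl)
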